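-- pv_equiv track=rewrite | github.com/Shaqaveli/Blackjack | Game.py | bustCheck
-- ===== SOURCE A (Python) =====
-- def getScore(hand):
--   score=0
--   for card,value in hand.items():
--     score+=value
--   return score
--
-- def bustCheck(current_player_hand):
--   # Add up all the cards in the player's hand
--   total=getScore(current_player_hand)
--   # If the player's score is greater than 21, check for Aces valued at 11 in their hand, and if any are found change the value of the first one encountered to 1
--   if total>21:
--     aceExisted=False
--     for card,value in current_player_hand.items():
--       if value==11:
--         current_player_hand[card]=1
--         aceExisted=True
--         break
--     # If there are no aces to change value on and their score is still above 21, the player has busted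
--     if not aceExisted and total>21:
--       return True
--     # Check again if player busted after changing out first Ace
--     if bustCheck(current_player_hand):
--       return True
--     else:
--       return False
--   # If the player's score is less than 21, they have not busted
--   elif total<21:
--     return False
-- ===== SOURCE B (Python) =====
-- def bustCheck(current_player_hand):
--     # Single pass: walk the hand once, demoting 11-valued aces to 1 in place
--     # while the running total is over 21, then report whether we are still over.
--     total = sum(current_player_hand.values())
--     for card, value in current_player_hand.items():
--         if total <= 21:
--             break
--         if value == 11:
--             current_player_hand[card] = 1
--             total -= 10
--     return total > 21
-- ===== Notes on version B (the rewrite author's own statement) =====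
-- stated objective: simpler
-- what changed: Replaces the per-ace recursion (each level re-summing the whole dict and rescanning for the first ace) with a single pass that keeps a running total and demotes aces while over 21.
-- intended difference: On hands whose values sum to exactly 21, A falls through both branches and returns None, while B returns False; a 21-point hand is not a bust, so False is the intended value. — e.g. on bustCheck([("K", 10), ("A", 11)]): A returns none, B returns some false
import Mathlib
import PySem

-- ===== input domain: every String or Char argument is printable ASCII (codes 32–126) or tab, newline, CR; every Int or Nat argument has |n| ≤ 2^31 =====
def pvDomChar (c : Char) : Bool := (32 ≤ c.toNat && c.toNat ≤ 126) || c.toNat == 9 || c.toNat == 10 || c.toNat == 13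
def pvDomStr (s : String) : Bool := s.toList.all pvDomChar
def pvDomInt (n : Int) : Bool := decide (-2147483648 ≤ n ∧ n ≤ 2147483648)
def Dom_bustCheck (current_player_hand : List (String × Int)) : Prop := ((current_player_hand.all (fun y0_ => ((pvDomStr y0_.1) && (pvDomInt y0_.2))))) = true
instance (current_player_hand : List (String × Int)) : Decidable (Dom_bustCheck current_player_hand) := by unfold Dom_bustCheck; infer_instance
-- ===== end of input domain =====

-- B replaces the per-ace recursion with one running-total pass; on hands summing to exactly 21
-- A falls through to None while B returns False (stated as D_). Return-value equivalence only;
-- both Pythons demote the same aces in place.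


-- ===== PORT A =====
-- getScore: score = 0; for card, value in hand.items(): score += value
def getScorePort (hand : List (String × Int)) : Int :=
  hand.foldl (fun score p => score + p.2) 0

-- the ace loop: scan items in order, set the first value==11 entry to 1 and break.
-- (A dict has distinct keys, so `current_player_hand[card] = 1` updates exactly that entry.)
def setFirstAce : List (String × Int) → List (String × Int)
  | [] => []
  | (c, v) :: t => if v == 11 then (c, 1) :: t else (c, v) :: setFirstAce t

def countAces (hand : List (String × Int)) : Nat :=
  (hand.map Prod.snd).count 11

theorem countAces_setFirstAce (hand : List (String × Int))
    (h : hand.any (fun p => p.2 == 11) = true) :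
    countAces (setFirstAce hand) + 1 = countAces hand := by
  induction hand with
  | nil => simp at h
  | cons a t ih =>
    by_cases hv : a.2 = 11
    · obtain ⟨c, v⟩ := a
      simp_all [setFirstAce, countAces]
    · obtain ⟨c, v⟩ := a
      simp only [List.any_cons, Bool.or_eq_true, beq_iff_eq] at h
      simp only at hv
      rcases h with h | h
      · exact absurd h hv
      · have h2 := ih h
        unfold countAces at h2 ⊢
        simpa [setFirstAce, hv, List.count_cons] using h2

def bustCheck (current_player_hand : List (String × Int)) : Option Bool :=
  let total := getScorePort current_player_hand
  if total > 21 then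
    if hA : current_player_hand.any (fun p => p.2 == 11) = true then
      -- aceExisted = True: recurse; `if bustCheck(...)` is truthy only on True (None is falsy)
      some ((bustCheck (setFirstAce current_player_hand)).getD false)
    else
      -- no ace and total > 21: busted
      some true
  else if total < 21 then some false
  else none
termination_by countAces current_player_hand
decreasing_by
  have := countAces_setFirstAce current_player_hand hA
  omega

-- ===== PORT B =====
-- Source B's loop: walk the items once, keeping the running total (mutation of the dict
-- does not affect the return value, which is all that is ported).
def bustAltLoop : List (String × Int) → Int → Int
  | [], total => total
  | (_, v) :: t, total =>
    if total ≤ 21 then total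
    else if v == 11 then bustAltLoop t (total - 10) else bustAltLoop t total

def bustCheck_alt (current_player_hand : List (String × Int)) : Option Bool :=
  let total := (current_player_hand.map Prod.snd).sum
  some (decide (bustAltLoop current_player_hand total > 21))

-- ===== PRECONDITION & SPEC =====
-- On hands whose values sum to exactly 21, A falls through both branches and returns None,
-- while B returns False; a 21-point hand is not a bust, so False is the intended value.
def D_bustCheck (current_player_hand : List (String × Int)) : Prop :=
  current_player_hand.foldr (fun p s => p.2 + s) 0 = 21
instance (current_player_hand : List (String × Int)) : Decidable (D_bustCheck current_player_hand) := by unfold D_bustCheck; infer_instance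

def Spec_bustCheck (current_player_hand : List (String × Int)) (out : Option Bool) : Prop := ¬ D_bustCheck current_player_hand → out = bustCheck_alt current_player_hand
instance (current_player_hand : List (String × Int)) (out : Option Bool) : Decidable (Spec_bustCheck current_player_hand out) := by unfold Spec_bustCheck; infer_instance

def pvDiffWitness_bustCheck : (List (String × Int)) := [("K", 10), ("A", 11)]
def pvDiffWitnessOut_bustCheck : (Option Bool) × (Option Bool) := (none, some false)

-- ===== CLAIM (what is proved, stated in full; the proofs are below) =====
def Claim_unchanged_bustCheck : Prop := ∀ (current_player_hand : List (String × Int)), Dom_bustCheck current_player_hand → Spec_bustCheck current_player_hand (bustCheck current_player_hand)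
def Claim_changed_bustCheck : Prop := Dom_bustCheck (pvDiffWitness_bustCheck) ∧ D_bustCheck (pvDiffWitness_bustCheck) ∧ bustCheck (pvDiffWitness_bustCheck) = pvDiffWitnessOut_bustCheck.1 ∧ bustCheck_alt (pvDiffWitness_bustCheck) = pvDiffWitnessOut_bustCheck.2 ∧ pvDiffWitnessOut_bustCheck.1 ≠ pvDiffWitnessOut_bustCheck.2
def Claim_exact_bustCheck : Prop := ∀ (current_player_hand : List (String × Int)), Dom_bustCheck current_player_hand → D_bustCheck current_player_hand → bustCheck current_player_hand ≠ bustCheck_alt current_player_hand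

-- ===== LEMMAS AND PROOFS =====

theorem foldr_snd_eq_sum (hand : List (String × Int)) :
    hand.foldr (fun p s => p.2 + s) 0 = (hand.map Prod.snd).sum := by
  induction hand with
  | nil => rfl
  | cons a t ih => simp [ih]

theorem D_iff (hand : List (String × Int)) :
    D_bustCheck hand ↔ (hand.map Prod.snd).sum = 21 := by
  unfold D_bustCheck
  rw [foldr_snd_eq_sum]

theorem getScorePort_eq (hand : List (String × Int)) :
    getScorePort hand = (hand.map Prod.snd).sum := by
  unfold getScorePort
  simpa using PySem.List.foldl_add (l := hand) (a := 0) (g := Prod.snd)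

theorem sum_setFirstAce (hand : List (String × Int))
    (h : hand.any (fun p => p.2 == 11) = true) :
    ((setFirstAce hand).map Prod.snd).sum = (hand.map Prod.snd).sum - 10 := by
  induction hand with
  | nil => simp at h
  | cons a t ih =>
    obtain ⟨c, v⟩ := a
    by_cases hv : v = 11
    · simp [setFirstAce, hv]; ring
    · simp only [List.any_cons, Bool.or_eq_true, beq_iff_eq] at h
      rcases h with h | h
      · exact absurd h hv
      · simp [setFirstAce, hv, ih h]; ring

theorem noAce_count (hand : List (String × Int))
    (h : ¬ hand.any (fun p => p.2 == 11) = true) :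
    countAces hand = 0 := by
  simp only [List.any_eq_true, not_exists, not_and, Bool.not_eq_true, beq_eq_false_iff_ne] at h
  unfold countAces
  rw [List.count_eq_zero]
  intro hm
  rcases List.mem_map.mp hm with ⟨p, hp, hv⟩
  exact h p hp hv

-- closed form both sides are compared against
def closedForm (hand : List (String × Int)) : Option Bool :=
  let S := (hand.map Prod.snd).sum
  if S > 21 then some (decide (S - 10 * (countAces hand : Int) > 21))
  else if S < 21 then some false
  else none

theorem bustCheck_eq_closed (n : Nat) :
    ∀ hand : List (String × Int), countAces hand ≤ n →
      bustCheck hand = closedForm hand := by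
  induction n with
  | zero =>
    intro hand hc
    unfold bustCheck closedForm
    rw [getScorePort_eq]
    have hz : countAces hand = 0 := Nat.le_zero.mp hc
    by_cases hA : hand.any (fun p => p.2 == 11) = true
    · exfalso; have := countAces_setFirstAce hand hA; omega
    · simp only [hA]
      have hzi : ((countAces hand : Int)) = 0 := by exact_mod_cast congrArg Nat.cast hz
      rw [hzi]
      split_ifs <;> (try simp_all) <;> (try omega)
  | succ n ih =>
    intro hand hc
    unfold bustCheck
    rw [getScorePort_eq]
    set S := (hand.map Prod.snd).sum with hS
    by_cases hgt : S > 21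
    · by_cases hA : hand.any (fun p => p.2 == 11) = true
      · have hcount := countAces_setFirstAce hand hA
        have hsum := sum_setFirstAce hand hA
        have hrec := ih (setFirstAce hand) (by omega)
        simp only [hgt, if_true, hA, dite_true]
        rw [hrec]
        unfold closedForm
        simp only [hsum, ← hS]
        have hc' : (countAces (setFirstAce hand) : Int) = (countAces hand : Int) - 1 := by omega
        split_ifs <;> (try simp_all) <;> (try omega)
      · have hz : countAces hand = 0 := noAce_count hand hA
        unfold closedForm
        simp only [hgt, if_true, hA, ← hS, hz]
        split_ifs <;> (try simp_all) <;> (try omega)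
    · unfold closedForm
      simp only [← hS, hgt, if_false]

theorem bustAltLoop_gt (hand : List (String × Int)) :
    ∀ total : Int, (bustAltLoop hand total > 21) ↔ (total - 10 * (countAces hand : Int) > 21) := by
  induction hand with
  | nil => intro total; simp [bustAltLoop, countAces]
  | cons a t ih =>
    intro total
    obtain ⟨c, v⟩ := a
    by_cases hle : total ≤ 21
    · have hz : (0:Int) ≤ (countAces ((c,v)::t) : Int) := by positivity
      simp only [bustAltLoop, hle, if_true]
      constructor
      · omega
      · intro h; omega
    · by_cases hv : v = 11
      · subst hv
        have h1 : countAces ((c, (11:Int)) :: t) = countAces t + 1 := by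
          unfold countAces; simp [List.count_cons]
        simp only [bustAltLoop, hle, if_false, beq_self_eq_true, if_true]
        rw [ih (total - 10), h1]
        push_cast
        omega
      · have hb : (v == 11) = false := by simp [hv]
        have h1 : countAces ((c, v) :: t) = countAces t := by
          unfold countAces; simp [List.count_cons, hv]
        simp only [bustAltLoop, hle, if_false, hb, Bool.false_eq_true]
        rw [ih total, h1]
  
theorem alt_eq_closed_decide (hand : List (String × Int)) :
    bustCheck_alt hand
      = some (decide ((hand.map Prod.snd).sum - 10 * (countAces hand : Int) > 21)) := by
  unfold bustCheck_alt
  simp only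
  congr 1
  simp only [decide_eq_decide]
  exact bustAltLoop_gt hand ((hand.map Prod.snd).sum)

-- ===== VERDICT (by name: the statement is the Claim_ definition above) =====
theorem bustCheck_spec : Claim_unchanged_bustCheck := by
  intro hand _ hD
  rw [bustCheck_eq_closed (countAces hand) hand le_rfl, alt_eq_closed_decide]
  unfold closedForm
  have hD' : (hand.map Prod.snd).sum ≠ 21 := fun h => hD ((D_iff hand).mpr h)
  have hz : (0:Int) ≤ (countAces hand : Int) := by positivity
  by_cases h1 : (hand.map Prod.snd).sum > 21
  · simp [h1]
  · have h2 : (hand.map Prod.snd).sum < 21 := by omega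
    simp only [h1, if_false, h2, if_pos]
    simp
    omega

theorem bustCheck_changed : Claim_changed_bustCheck := by
  unfold Claim_changed_bustCheck
  refine ⟨by decide, by decide, ?_, by decide, by decide⟩
  rw [bustCheck_eq_closed (countAces pvDiffWitness_bustCheck) _ le_rfl]
  decide

theorem bustCheck_tight : Claim_exact_bustCheck := by
  intro hand _ hD
  rw [bustCheck_eq_closed (countAces hand) hand le_rfl, alt_eq_closed_decide]
  have hD' : (hand.map Prod.snd).sum = 21 := (D_iff hand).mp hD
  unfold closedForm
  simp [hD']
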